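-- pv_equiv track=rewrite | github.com/akashgkrishnan/HackerRank_Solutions | geeks_for_geek/longest_subArray.py | subarray_finder
-- ===== SOURCE A (Python) =====
-- def subarray_finder(array):
--     longest = 0
--     counter = 0
--     for item in array:
--         if item < 0:
--             if longest <= counter:
--                 longest = counter
--             counter = 0
--         else:
--             counter += 1
--     return max(longest, counter)
-- ===== SOURCE B (Python) =====
-- def subarray_finder(array):
--     runs = []
--     i = 0
--     n = len(array)
--     while i < n:
--         if array[i] < 0:
--             i += 1
--         else:
--             j = i
--             while j < n and array[j] >= 0:
--                 j += 1
--             runs.append(j - i)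
--             i = j
--     return max(runs, default=0)
-- ===== Notes on version B (the rewrite author's own statement) =====
-- stated objective: alternative
-- what changed: B collects the lengths of the maximal non-negative runs in one group-then-measure pass (span over each run) and returns their maximum with default 0, instead of A's incremental counter with a compare-and-reset at each negative element.
import Mathlib
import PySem

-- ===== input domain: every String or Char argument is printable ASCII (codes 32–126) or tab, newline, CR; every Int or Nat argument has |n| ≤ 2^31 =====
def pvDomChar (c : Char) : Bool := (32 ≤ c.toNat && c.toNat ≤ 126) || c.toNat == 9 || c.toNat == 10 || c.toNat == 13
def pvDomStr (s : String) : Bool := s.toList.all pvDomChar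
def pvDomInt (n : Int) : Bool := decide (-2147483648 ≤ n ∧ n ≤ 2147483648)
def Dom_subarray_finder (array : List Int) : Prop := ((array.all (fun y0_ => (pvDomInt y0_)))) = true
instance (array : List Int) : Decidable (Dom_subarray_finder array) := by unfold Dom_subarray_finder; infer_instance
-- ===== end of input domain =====

-- B collects the lengths of the maximal non-negative runs and takes their maximum
-- (default 0), instead of A's incremental counter; same O(n) cost, alternative structure.

-- ===== PORT A =====
-- step of A's for-loop over state (longest, counter)
def subFinderStep (s : Int × Int) (item : Int) : Int × Int :=
  if item < 0 then (if s.1 ≤ s.2 then (s.2, 0) else (s.1, 0)) else (s.1, s.2 + 1)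

def subarray_finder (array : List Int) : Int :=
  let s := array.foldl subFinderStep (0, 0)
  max s.1 s.2

-- ===== PORT B =====
-- the outer while-loop of B: skip a negative, or span a whole non-negative run,
-- recording its length (1 + length of the non-negative prefix of the tail)
def collectRuns (xs : List Int) : List Int :=
  match xs with
  | [] => []
  | x :: rest =>
    if x < 0 then collectRuns rest
    else ((1 : Int) + (rest.takeWhile (fun y => decide (0 ≤ y))).length)
           :: collectRuns (rest.dropWhile (fun y => decide (0 ≤ y)))
termination_by xs.length
decreasing_by
  · simp
  · simpa using Nat.lt_succ_of_le (List.length_dropWhile_le _ _)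

-- max(runs, default=0)
def maxD0 : List Int → Int
  | [] => 0
  | r :: rs => max r (maxD0 rs)

def subarray_finder_alt (array : List Int) : Int := maxD0 (collectRuns array)

-- ===== PRECONDITION & SPEC =====
def Spec_subarray_finder (array : List Int) (out : Int) : Prop := out = subarray_finder_alt array
instance (array : List Int) (out : Int) : Decidable (Spec_subarray_finder array out) := by unfold Spec_subarray_finder; infer_instance

-- ===== CLAIM (what is proved, stated in full; the proofs are below) =====
def Claim_equal_subarray_finder : Prop := ∀ (array : List Int), Dom_subarray_finder array → Spec_subarray_finder array (subarray_finder array)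

-- ===== LEMMAS AND PROOFS =====

-- reference function: maximum run length, given current prefix-run count c
def mr : List Int → Int → Int
  | [], c => c
  | x :: xs, c => if x < 0 then max c (mr xs 0) else mr xs (c + 1)

theorem mr_nonneg : ∀ (xs : List Int) (c : Int), 0 ≤ c → 0 ≤ mr xs c := by
  intro xs
  induction xs with
  | nil => intro c hc; simpa [mr] using hc
  | cons x xs ih =>
    intro c hc
    simp only [mr]
    split
    · exact le_max_of_le_left hc
    · exact ih (c + 1) (by omega)

theorem foldA_eq_mr : ∀ (xs : List Int) (l c : Int),
    (let s := xs.foldl subFinderStep (l, c); max s.1 s.2) = max l (mr xs c) := by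
  intro xs
  induction xs with
  | nil => intro l c; simp [mr]
  | cons x xs ih =>
    intro l c
    simp only [List.foldl_cons, subFinderStep, mr]
    by_cases hx : x < 0
    · simp only [hx, if_pos]
      by_cases hlc : l ≤ c
      · simp only [hlc, if_pos, ih]
        rcases le_total l c with h | h <;> rcases le_total c (mr xs 0) with h2 | h2 <;>
          simp [max_def] <;> omega
      · simp only [hlc, if_neg, not_false_iff, ih]
        simp [max_def]; omega
    · simp only [hx, if_neg, not_false_iff, ih]

theorem mr_append_nonneg : ∀ (g rest : List Int) (c : Int),
    (∀ y ∈ g, 0 ≤ y) → mr (g ++ rest) c = mr rest (c + g.length) := by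
  intro g
  induction g with
  | nil => intro rest c _; simp
  | cons y g ih =>
    intro rest c hy
    have h0 : 0 ≤ y := hy y (by simp)
    simp only [List.cons_append, mr, show ¬ y < 0 by omega, if_neg, not_false_iff]
    rw [ih rest (c + 1) (fun z hz => hy z (by simp [hz]))]
    congr 1
    simp; omega

-- restart: if rest is empty or starts with a negative, counting from c just competes with c
theorem mr_restart (rest : List Int) (c : Int) (hc : 0 ≤ c)
    (h : rest = [] ∨ ∃ y ys, rest = y :: ys ∧ y < 0) : mr rest c = max c (mr rest 0) := by
  rcases h with h | ⟨y, ys, rfl, hy⟩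
  · subst h; simp [mr]; omega
  · simp only [mr, hy, if_pos]
    have := mr_nonneg ys 0 le_rfl
    simp [max_def]; omega

theorem dropWhile_shape (p : Int → Bool) : ∀ (xs : List Int),
    xs.dropWhile p = [] ∨ ∃ y ys, xs.dropWhile p = y :: ys ∧ p y = false := by
  intro xs
  induction xs with
  | nil => simp
  | cons x xs ih =>
    by_cases hx : p x = true
    · simpa [List.dropWhile, hx] using ih
    · right
      exact ⟨x, xs, by simp [List.dropWhile, hx], by simpa using hx⟩

theorem collect_eq_mr : ∀ (xs : List Int), maxD0 (collectRuns xs) = mr xs 0 := by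
  intro xs
  induction hn : xs.length using Nat.strong_induction_on generalizing xs with
  | _ n ih =>
  match xs, hn with
  | [], _ => simp [collectRuns, maxD0, mr]
  | x :: rest, hn =>
    by_cases hx : x < 0
    · rw [collectRuns]
      simp only [hx, if_pos]
      rw [ih rest.length (by simp at hn; omega) rest rfl]
      have := mr_nonneg rest 0 le_rfl
      simp [mr, hx, max_def]
      omega
    · rw [collectRuns]
      simp only [hx, if_neg, not_false_iff, maxD0]
      set p : Int → Bool := fun y => decide (0 ≤ y) with hp
      set g := rest.takeWhile p with hg
      set r := rest.dropWhile p with hr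
      have hsplit : g ++ r = rest := List.takeWhile_append_dropWhile
      have hlen_r : r.length ≤ rest.length := List.length_dropWhile_le _ _
      have hrec : maxD0 (collectRuns r) = mr r 0 := by
        refine ih r.length (by simp at hn; omega) r rfl
      have hgpos : ∀ y ∈ g, 0 ≤ y := by
        intro y hy
        have := List.mem_takeWhile_imp (hg ▸ hy)
        simpa [hp] using this
      have h1 : mr (x :: rest) 0 = mr r ((0 : Int) + 1 + g.length) := by
        simp only [mr, hx, if_neg, not_false_iff]
        rw [← hsplit, mr_append_nonneg g r (0 + 1) hgpos]
      have hshape := dropWhile_shape p rest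
      have h2 : mr r ((0 : Int) + 1 + g.length) = max ((0 : Int) + 1 + g.length) (mr r 0) := by
        apply mr_restart
        · omega
        · rcases hshape with h | ⟨y, ys, hys, hpy⟩
          · left; rw [hr]; exact h
          · right; exact ⟨y, ys, hr ▸ hys, by simp [hp] at hpy; omega⟩
      rw [h1, h2, hrec]
      norm_num

-- ===== VERDICT (by name: the statement is the Claim_ definition above) =====
theorem subarray_finder_spec : Claim_equal_subarray_finder := by
  intro array _
  show subarray_finder array = subarray_finder_alt array
  unfold subarray_finder subarray_finder_alt
  rw [collect_eq_mr]
  have := foldA_eq_mr array 0 0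
  simp only at this
  rw [this]
  exact max_eq_right (mr_nonneg array 0 le_rfl)
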